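-- pv_equiv track=rewrite | github.com/andygellermen/infra | scripts/wp-normalize-hostvars.py | build_aliases
-- ===== SOURCE A (Python) =====
-- def build_aliases(domain: str, configured_aliases: list[str]) -> list[str]:
--     aliases: list[str] = []
--     seen: set[str] = set()
--
--     def add(alias: str) -> None:
--         alias = (alias or "").strip()
--         if not alias or alias == domain or alias in seen:
--             return
--         seen.add(alias)
--         aliases.append(alias)
--
--     add(f"www.{domain}")
--     for alias in configured_aliases:
--         alias = (alias or "").strip()
--         if not alias:
--             continue
--         add(alias)
--         if not alias.startswith("www."):
--             add(f"www.{alias}")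
--
--     return aliases
-- ===== SOURCE B (Python) =====
-- def build_aliases(domain: str, configured_aliases: list[str]) -> list[str]:
--     # Phase 1: generate the ordered candidate list.
--     cands = ["www." + domain]
--     for alias in configured_aliases:
--         a = alias.strip()
--         if not a:
--             continue
--         cands.append(a)
--         if not a.startswith("www."):
--             cands.append("www." + a)
--     # Phase 2: a separate strip/filter/dedup pass over the candidates.
--     result: list[str] = []
--     seen: set[str] = set()
--     for c in cands:
--         c = c.strip()
--         if c and c != domain and c not in seen:
--             seen.add(c)
--             result.append(c)
--     return result
-- ===== Notes on version B (the rewrite author's own statement) =====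
-- stated objective: simpler
-- what changed: B splits A's single interleaved generate-and-dedup pass (a nested 'add' closure mutating the result list and a 'seen' set while generating) into two plain sequential loops: one that builds the flat ordered candidate list, then a separate strip/filter/dedup pass over it.
import Mathlib
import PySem

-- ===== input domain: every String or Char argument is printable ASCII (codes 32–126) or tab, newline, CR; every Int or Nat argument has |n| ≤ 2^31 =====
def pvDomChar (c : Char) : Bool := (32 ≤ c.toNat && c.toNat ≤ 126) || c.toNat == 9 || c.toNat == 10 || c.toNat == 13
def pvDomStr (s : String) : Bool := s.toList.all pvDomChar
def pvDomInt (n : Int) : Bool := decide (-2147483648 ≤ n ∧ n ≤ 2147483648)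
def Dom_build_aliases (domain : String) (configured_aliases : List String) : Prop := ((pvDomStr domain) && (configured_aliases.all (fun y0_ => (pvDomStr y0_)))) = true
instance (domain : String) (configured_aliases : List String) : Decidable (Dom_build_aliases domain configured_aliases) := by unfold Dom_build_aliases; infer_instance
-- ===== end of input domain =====

-- B replaces A's closure-based interleaved generate-and-dedup pass (result list + parallel
-- 'seen' set) by two plain loops: build the candidate list, then dedup against the result list.

-- ===== PORT A =====
-- the nested 'add' closure: state = (aliases, seen)
def pyAdd (domain : String) (st : List String × PySem.Set String)
    (al : String) : List String × PySem.Set String :=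
  let a := PySem.Str.strip al
  if a = "" ∨ a = domain ∨ PySem.Set.contains st.2 a = true then st
  else (st.1 ++ [a], PySem.Set.add st.2 a)

-- one iteration of A's for-loop
def pyStep (domain : String) (st : List String × PySem.Set String)
    (al : String) : List String × PySem.Set String :=
  let a := PySem.Str.strip al
  if a = "" then st
  else
    let st := pyAdd domain st a
    if PySem.Str.startswith a "www." = true then st
    else pyAdd domain st ("www." ++ a)

def build_aliases (domain : String) (configured_aliases : List String) : List String :=
  let st0 : List String × PySem.Set String := ([], PySem.Set.empty)
  let st1 := pyAdd domain st0 ("www." ++ domain)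
  (configured_aliases.foldl (pyStep domain) st1).1

-- ===== PORT B =====
-- phase 1 loop body of Source B: append this alias's candidates
def bGenStep (acc : List String) (al : String) : List String :=
  let a := PySem.Str.strip al
  if a = "" then acc
  else if PySem.Str.startswith a "www." = true then acc ++ [a]
  else acc ++ [a, "www." ++ a]

-- phase 2 loop body of Source B: strip, filter, dedup via a seen set; state = (result, seen)
def bDedupStep (domain : String) (st : List String × PySem.Set String)
    (c : String) : List String × PySem.Set String :=
  let c := PySem.Str.strip c
  if ¬ c = "" ∧ ¬ c = domain ∧ ¬ PySem.Set.contains st.2 c = true then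
    (st.1 ++ [c], PySem.Set.add st.2 c)
  else st

def build_aliases_alt (domain : String) (configured_aliases : List String) : List String :=
  let cands := configured_aliases.foldl bGenStep ["www." ++ domain]
  (cands.foldl (bDedupStep domain) ([], PySem.Set.empty)).1

-- ===== PRECONDITION & SPEC =====
def Spec_build_aliases (domain : String) (configured_aliases : List String) (out : List String) : Prop := out = build_aliases_alt domain configured_aliases
instance (domain : String) (configured_aliases : List String) (out : List String) : Decidable (Spec_build_aliases domain configured_aliases out) := by unfold Spec_build_aliases; infer_instance

-- ===== CLAIM (what is proved, stated in full; the proofs are below) =====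
def Claim_equal_build_aliases : Prop := ∀ (domain : String) (configured_aliases : List String), Dom_build_aliases domain configured_aliases → Spec_build_aliases domain configured_aliases (build_aliases domain configured_aliases)

-- ===== LEMMAS AND PROOFS =====

lemma pyAdd_eq (domain : String) (st : List String × PySem.Set String) (al : String) :
    pyAdd domain st al = bDedupStep domain st al := by
  unfold pyAdd bDedupStep
  dsimp only
  split_ifs with h1 h2 <;> first | rfl | tauto

-- the per-alias chunk of candidates B generates
def pvChunk (al : String) : List String :=
  let a := PySem.Str.strip al
  if a = "" then []
  else if PySem.Str.startswith a "www." = true then [a]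
  else [a, "www." ++ a]

lemma bGenStep_eq (acc : List String) (al : String) :
    bGenStep acc al = acc ++ pvChunk al := by
  unfold bGenStep pvChunk
  dsimp only
  split_ifs <;> simp

lemma cands_eq (cfg : List String) (acc : List String) :
    cfg.foldl bGenStep acc = acc ++ cfg.flatMap pvChunk := by
  induction cfg generalizing acc with
  | nil => simp
  | cons hd tl ih =>
    simp only [List.foldl_cons, List.flatMap_cons, bGenStep_eq]
    rw [ih, List.append_assoc]

lemma pyStep_eq (domain : String) (st : List String × PySem.Set String) (al : String) :
    pyStep domain st al = (pvChunk al).foldl (bDedupStep domain) st := by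
  unfold pyStep pvChunk
  dsimp only
  split_ifs with h1 h2
  · rfl
  · simp only [List.foldl_cons, List.foldl_nil, pyAdd_eq]
  · simp only [List.foldl_cons, List.foldl_nil, pyAdd_eq]

lemma loop_eq (domain : String) (cfg : List String)
    (st : List String × PySem.Set String) :
    cfg.foldl (pyStep domain) st
    = (cfg.flatMap pvChunk).foldl (bDedupStep domain) st := by
  induction cfg generalizing st with
  | nil => simp
  | cons hd tl ih =>
    simp only [List.foldl_cons, List.flatMap_cons, List.foldl_append, pyStep_eq]
    rw [ih]

-- ===== VERDICT (by name: the statement is the Claim_ definition above) =====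
theorem build_aliases_spec : Claim_equal_build_aliases := by
  intro domain cfg _
  unfold Spec_build_aliases build_aliases build_aliases_alt
  dsimp only
  rw [cands_eq, loop_eq]
  simp only [List.singleton_append, List.foldl_cons, pyAdd_eq]
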